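-- pv_equiv track=rewrite | github.com/Gabriel0402/MATEA | marl/reward_machines/reward_machines/reward_machine_utils.py | evaluate_dnf
-- ===== SOURCE A (Python) =====
-- def evaluate_dnf(formula,true_props):
--     """
--     Evaluates 'formula' assuming 'true_props' are the only true propositions and the rest are false.
--     e.g. evaluate_dnf("a&b|!c&d","d") returns True
--     """
--     # ORs
--     if "|" in formula:
--         for f in formula.split("|"):
--             if evaluate_dnf(f,true_props):
--                 return True
--         return False
--     # ANDs
--     if "&" in formula:
--         for f in formula.split("&"):
--             if not evaluate_dnf(f,true_props):
--                 return False
--         return True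
--     # NOT
--     if formula.startswith("!"):
--         return not evaluate_dnf(formula[1:],true_props)
--
--     # Base cases
--     if formula == "True":  return True
--     if formula == "False": return False
--     return formula in true_props
-- ===== SOURCE B (Python) =====
-- def evaluate_dnf(formula, true_props):
--     def eval_literal(lit):
--         neg = 0
--         while lit.startswith("!"):
--             neg += 1
--             lit = lit[1:]
--         if lit == "True":
--             val = True
--         elif lit == "False":
--             val = False
--         else:
--             val = lit in true_props
--         return val != (neg % 2 == 1)
--
--     return any(all(eval_literal(lit) for lit in clause.split("&"))
--                for clause in formula.split("|"))
-- ===== Notes on version B (the rewrite author's own statement) =====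
-- stated objective: simpler
-- what changed: Replaces A's recursive function that re-dispatches on '|'/'&'/'!' at every level by one non-recursive any/all nest over the two splits plus a literal evaluator that strips leading '!' counting parity.
import Mathlib
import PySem

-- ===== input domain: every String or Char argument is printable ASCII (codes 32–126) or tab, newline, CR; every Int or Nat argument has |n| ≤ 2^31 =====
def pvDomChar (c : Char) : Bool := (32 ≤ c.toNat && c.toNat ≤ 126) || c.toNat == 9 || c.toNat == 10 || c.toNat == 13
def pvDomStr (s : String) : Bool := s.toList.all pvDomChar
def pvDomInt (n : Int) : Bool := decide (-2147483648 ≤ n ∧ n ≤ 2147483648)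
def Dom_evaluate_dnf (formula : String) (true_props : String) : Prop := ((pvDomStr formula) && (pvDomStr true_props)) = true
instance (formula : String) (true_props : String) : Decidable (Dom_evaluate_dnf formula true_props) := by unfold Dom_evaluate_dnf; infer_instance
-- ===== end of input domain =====

-- B replaces A's recursive '|'/'&' re-dispatch by one explicit any/all nest over the two splits
-- plus a parity-counting literal evaluator (objective: simpler; same cost).

-- ===== PORT A =====
-- Literal transliteration of A; the Nat fuel only makes the recursion structural
-- (formula.length + 1 always suffices, as the proof below shows).
def pvEvalA : Nat → List Char → List Char → Bool
  | 0, _, _ => false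
  | fuel+1, formula, tp =>
    if PySem.Chars.isIn ['|'] formula then
      ((PySem.Chars.split? formula ['|']).getD []).any (fun f => pvEvalA fuel f tp)
    else if PySem.Chars.isIn ['&'] formula then
      ((PySem.Chars.split? formula ['&']).getD []).all (fun f => pvEvalA fuel f tp)
    else if PySem.Chars.startswith formula ['!'] then
      !(pvEvalA fuel (PySem.List.slice formula (some 1) none) tp)
    else if formula = "True".toList then true
    else if formula = "False".toList then false
    else PySem.Chars.isIn formula tp

def evaluate_dnf (formula : String) (true_props : String) : Bool :=
  pvEvalA (formula.toList.length + 1) formula.toList true_props.toList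

-- ===== PORT B =====
-- the while-loop of Source B stripping leading '!' and counting them
def pvStripNeg : List Char → Nat × List Char
  | [] => (0, [])
  | c :: rest =>
    if c = '!' then ((pvStripNeg rest).1 + 1, (pvStripNeg rest).2)
    else (0, c :: rest)

def pvEvalLit (lit : List Char) (tp : List Char) : Bool :=
  let l := (pvStripNeg lit).2
  let val : Bool :=
    if l = "True".toList then true
    else if l = "False".toList then false
    else PySem.Chars.isIn l tp
  val != decide ((pvStripNeg lit).1 % 2 = 1)

def evaluate_dnf_alt (formula : String) (true_props : String) : Bool :=
  ((PySem.Chars.split? formula.toList ['|']).getD []).any (fun clause =>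
    ((PySem.Chars.split? clause ['&']).getD []).all (fun lit =>
      pvEvalLit lit true_props.toList))

-- ===== PRECONDITION & SPEC =====
def Spec_evaluate_dnf (formula : String) (true_props : String) (out : Bool) : Prop := out = evaluate_dnf_alt formula true_props
instance (formula : String) (true_props : String) (out : Bool) : Decidable (Spec_evaluate_dnf formula true_props out) := by unfold Spec_evaluate_dnf; infer_instance

-- ===== CLAIM (what is proved, stated in full; the proofs are below) =====
def Claim_equal_evaluate_dnf : Prop := ∀ (formula : String) (true_props : String), Dom_evaluate_dnf formula true_props → Spec_evaluate_dnf formula true_props (evaluate_dnf formula true_props)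

-- ===== LEMMAS AND PROOFS =====

-- structural specification of splitting on a single character
def pvSp (c : Char) : List Char → List (List Char)
  | [] => [[]]
  | x :: rest =>
    if x = c then [] :: pvSp c rest
    else
      match pvSp c rest with
      | p :: ps => (x :: p) :: ps
      | [] => [[x]]

lemma pvSp_of_not_mem (c : Char) (l : List Char) (h : c ∉ l) : pvSp c l = [l] := by
  induction l with
  | nil => rfl
  | cons x rest ih =>
    simp only [List.mem_cons, not_or] at h
    simp [pvSp, Ne.symm h.1, ih h.2]

lemma pvSp_strong (c : Char) (l : List Char) :
    ∃ q qs, pvSp c l = q :: qs ∧ q <+: l ∧ c ∉ q ∧ ∀ p ∈ qs, c ∉ p ∧ p <:+: l := by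
  induction l with
  | nil => exact ⟨[], [], rfl, List.nil_prefix, by simp, by simp⟩
  | cons x rest ih =>
    obtain ⟨q, qs, hsp, hpre, hq, hqs⟩ := ih
    by_cases hx : x = c
    · refine ⟨[], q :: qs, by simp [pvSp, hx, hsp], List.nil_prefix, by simp, ?_⟩
      intro p hp
      rcases List.mem_cons.mp hp with rfl | hp
      · exact ⟨hq, (hpre.isInfix).trans (List.infix_cons (List.infix_refl rest))⟩
      · exact ⟨(hqs p hp).1, ((hqs p hp).2).trans (List.infix_cons (List.infix_refl rest))⟩
    · refine ⟨x :: q, qs, by simp [pvSp, hx, hsp], ?_, ?_, ?_⟩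
      · exact List.cons_prefix_cons.mpr ⟨rfl, hpre⟩
      · simp only [List.mem_cons, not_or]
        exact ⟨fun h => hx h.symm, hq⟩
      · intro p hp
        exact ⟨(hqs p hp).1, ((hqs p hp).2).trans (List.infix_cons (List.infix_refl rest))⟩

lemma pvSp_mem (c : Char) (l : List Char) (p : List Char) (hp : p ∈ pvSp c l) :
    c ∉ p ∧ p <:+: l := by
  obtain ⟨q, qs, hsp, hpre, hq, hqs⟩ := pvSp_strong c l
  rw [hsp] at hp
  rcases List.mem_cons.mp hp with rfl | hp
  · exact ⟨hq, hpre.isInfix⟩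
  · exact hqs p hp

lemma pvSp_mem_length_lt (c : Char) (l : List Char) (p : List Char)
    (hp : p ∈ pvSp c l) (hc : c ∈ l) : p.length < l.length := by
  obtain ⟨hcp, hinf⟩ := pvSp_mem c l p hp
  rcases Nat.lt_or_ge p.length l.length with h | h
  · exact h
  · exact absurd (hinf.eq_of_length (Nat.le_antisymm hinf.length_le h)) (by rintro rfl; exact hcp hc)

-- the fuel-based go of PySem.Chars.splitOn computes pvSp for a single-character separator
lemma pvSplitOn_go (c : Char) (l : List Char) :
    ∀ (fuel : Nat) (cur : List Char) (acc : List (List Char)), l.length ≤ fuel →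
    PySem.Chars.splitOn.go [c] fuel l cur acc
      = acc.reverse ++ (pvSp c l).modifyHead (fun p => cur.reverse ++ p) := by
  induction l with
  | nil =>
    intro fuel cur acc _
    cases fuel <;> simp [PySem.Chars.splitOn.go, pvSp]
  | cons x rest ih =>
    intro fuel cur acc hlen
    cases fuel with
    | zero => simp at hlen
    | succ f =>
      simp only [List.length_cons] at hlen
      by_cases hx : x = c
      · have hpref : List.isPrefixOf [c] (x :: rest) = true := by
          simp [List.isPrefixOf, hx]
        rw [PySem.Chars.splitOn.go, if_pos hpref]
        have hdrop : List.drop [c].length (x :: rest) = rest := by simp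
        rw [hdrop, ih f [] (cur.reverse :: acc) (by omega)]
        obtain ⟨q, qs, hsp, -⟩ := pvSp_strong c rest
        simp [pvSp, hx, hsp]
      · have hpref : List.isPrefixOf [c] (x :: rest) = false := by
          simp [List.isPrefixOf]
          exact fun h => hx h.symm
        rw [PySem.Chars.splitOn.go, if_neg (by simp [hpref])]
        rw [ih f (x :: cur) acc (by omega)]
        obtain ⟨q, qs, hsp, -⟩ := pvSp_strong c rest
        simp [pvSp, hx, hsp]

lemma pvSplit_eq (c : Char) (l : List Char) :
    PySem.Chars.split? l [c] = some (pvSp c l) := by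
  rw [PySem.Chars.split?]
  simp only [List.isEmpty_cons]
  rw [PySem.Chars.splitOn, pvSplitOn_go c l (l.length + 1) [] [] (by omega)]
  obtain ⟨q, qs, hsp, -⟩ := pvSp_strong c l
  simp [hsp]

lemma pvIsIn_false (c : Char) (l : List Char) (h : c ∉ l) :
    PySem.Chars.isIn [c] l = false := by
  rw [Bool.eq_false_iff]
  intro hin
  exact h ((List.singleton_infix_iff c l).mp ((PySem.Chars.isIn_iff_infix [c] l).mp hin))

lemma pvIsIn_true (c : Char) (l : List Char) (h : c ∈ l) :
    PySem.Chars.isIn [c] l = true := by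
  exact (PySem.Chars.isIn_iff_infix [c] l).mpr ((List.singleton_infix_iff c l).mpr h)

lemma pvAll_congr_mem {l : List (List Char)} {f g : List Char → Bool}
    (h : ∀ x ∈ l, f x = g x) : l.all f = l.all g := by
  induction l with
  | nil => rfl
  | cons x t ih =>
    simp only [List.all_cons, h x (by simp)]
    rw [ih fun y hy => h y (by simp [hy])]

lemma pvAny_congr_mem {l : List (List Char)} {f g : List Char → Bool}
    (h : ∀ x ∈ l, f x = g x) : l.any f = l.any g := by
  induction l with
  | nil => rfl
  | cons x t ih =>
    simp only [List.any_cons, h x (by simp)]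
    rw [ih fun y hy => h y (by simp [hy])]

lemma pvEvalLit_bang (rest tp : List Char) :
    pvEvalLit ('!' :: rest) tp = !(pvEvalLit rest tp) := by
  have hs : pvStripNeg ('!' :: rest) = ((pvStripNeg rest).1 + 1, (pvStripNeg rest).2) := by
    simp [pvStripNeg]
  simp only [pvEvalLit, hs]
  have hpar : (decide (((pvStripNeg rest).1 + 1) % 2 = 1))
      = !(decide ((pvStripNeg rest).1 % 2 = 1)) := by
    rcases Nat.mod_two_eq_zero_or_one (pvStripNeg rest).1 with h | h <;>
      simp [Nat.add_mod, h]
  rw [hpar]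
  cases (if (pvStripNeg rest).2 = "True".toList then true
    else if (pvStripNeg rest).2 = "False".toList then false
    else PySem.Chars.isIn (pvStripNeg rest).2 tp) <;>
    cases decide ((pvStripNeg rest).1 % 2 = 1) <;> rfl

-- a literal (no '|', no '&') is evaluated by A exactly as by B's eval_literal
lemma pvLit_eq (tp : List Char) (lit : List Char) (hb : '|' ∉ lit) (ha : '&' ∉ lit) :
    ∀ fuel, lit.length < fuel → pvEvalA fuel lit tp = pvEvalLit lit tp := by
  induction lit with
  | nil =>
    intro fuel hf
    cases fuel with
    | zero => omega
    | succ f =>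
      rw [pvEvalA, pvIsIn_false '|' [] (by simp), pvIsIn_false '&' [] (by simp)]
      simp only [Bool.false_eq_true, if_false]
      have hsw : PySem.Chars.startswith [] ['!'] = false := by
        simp [PySem.Chars.startswith, List.isPrefixOf]
      rw [hsw]
      simp only [Bool.false_eq_true, if_false]
      have h1 : ¬ (([] : List Char) = "True".toList) := by decide
      have h2 : ¬ (([] : List Char) = "False".toList) := by decide
      rw [if_neg h1, if_neg h2]
      simp [pvEvalLit, pvStripNeg]
  | cons x rest ih =>
    intro fuel hf
    cases fuel with
    | zero => omega
    | succ f =>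
      have hb' : '|' ∉ rest := fun h => hb (by simp [h])
      have ha' : '&' ∉ rest := fun h => ha (by simp [h])
      rw [pvEvalA, pvIsIn_false '|' (x :: rest) hb, pvIsIn_false '&' (x :: rest) ha]
      simp only [Bool.false_eq_true, if_false]
      by_cases hx : x = '!'
      · have hsw : PySem.Chars.startswith (x :: rest) ['!'] = true := by
          simp [PySem.Chars.startswith, List.isPrefixOf, hx]
        rw [hsw]
        simp only [if_true]
        have hslice : PySem.List.slice (x :: rest) (some 1) none = rest := by
          simp [pysem]
        rw [hslice, ih hb' ha' f (by simp at hf ⊢; omega), hx, pvEvalLit_bang]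
      · have hsw : PySem.Chars.startswith (x :: rest) ['!'] = false := by
          simp only [PySem.Chars.startswith, List.isPrefixOf, Bool.and_eq_false_iff]
          left
          simp only [beq_eq_false_iff_ne, ne_eq]
          exact fun h => hx h.symm
        rw [hsw]
        simp only [Bool.false_eq_true, if_false]
        have hs : pvStripNeg (x :: rest) = (0, x :: rest) := by
          simp [pvStripNeg, hx]
        simp [pvEvalLit, hs]

-- a clause (no '|') is evaluated by A exactly as by B's all-over-'&'-split
lemma pvClause_eq (tp : List Char) (p : List Char) (hb : '|' ∉ p) :
    ∀ fuel, p.length < fuel →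
      pvEvalA fuel p tp = (pvSp '&' p).all (fun lit => pvEvalLit lit tp) := by
  intro fuel hf
  cases fuel with
  | zero => omega
  | succ f =>
    have hnb : PySem.Chars.isIn ['|'] p = false := pvIsIn_false '|' p hb
    by_cases ha : '&' ∈ p
    · have hia : PySem.Chars.isIn ['&'] p = true := pvIsIn_true '&' p ha
      rw [pvEvalA, hnb]
      simp only [Bool.false_eq_true, if_false, hia, if_true, pvSplit_eq, Option.getD_some]
      refine pvAll_congr_mem fun lit hlit => ?_
      obtain ⟨hla, hinf⟩ := pvSp_mem '&' p lit hlit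
      have hlb : '|' ∉ lit := fun h => hb (hinf.mem h)
      exact pvLit_eq tp lit hlb hla f (by
        have := pvSp_mem_length_lt '&' p lit hlit ha
        omega)
    · rw [pvSp_of_not_mem '&' p ha]
      simp only [List.all_cons, List.all_nil, Bool.and_true]
      exact pvLit_eq tp p hb ha (f + 1) hf

lemma pvMain (formula tp : List Char) :
    pvEvalA (formula.length + 1) formula tp
      = (pvSp '|' formula).any (fun clause => (pvSp '&' clause).all (fun lit => pvEvalLit lit tp)) := by
  by_cases hb : '|' ∈ formula
  · have hib : PySem.Chars.isIn ['|'] formula = true := pvIsIn_true '|' formula hb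
    rw [pvEvalA, hib]
    simp only [if_true, pvSplit_eq, Option.getD_some]
    refine pvAny_congr_mem fun clause hcl => ?_
    obtain ⟨hca, -⟩ := pvSp_mem '|' formula clause hcl
    exact pvClause_eq tp clause hca formula.length (pvSp_mem_length_lt '|' formula clause hcl hb)
  · rw [pvSp_of_not_mem '|' formula hb]
    simp only [List.any_cons, List.any_nil, Bool.or_false]
    exact pvClause_eq tp formula hb (formula.length + 1) (by omega)

-- ===== VERDICT (by name: the statement is the Claim_ definition above) =====
theorem evaluate_dnf_spec : Claim_equal_evaluate_dnf := by
  intro formula tp _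
  unfold Spec_evaluate_dnf evaluate_dnf evaluate_dnf_alt
  rw [pvMain, pvSplit_eq]
  simp only [Option.getD_some]
  exact pvAny_congr_mem fun clause _ => by rw [pvSplit_eq]; rfl
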